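-- pv_equiv track=rewrite | github.com/ysgoh97/Gomoku-AI-Agent | agent2/gomoku_agent.py | _has_five_if_place
-- ===== SOURCE A (Python) =====
-- def _has_five_if_place(board, r: int, c: int, ch: str) -> bool:
--     n = len(board)
--     original = board[r][c]
--     board[r][c] = ch
--     dirs = [(0, 1), (1, 0), (1, 1), (1, -1)]
--
--     def count_line(rr, cc, dr, dc):
--         cnt = 0
--         i, j = rr, cc
--         while 0 <= i < n and 0 <= j < n and board[i][j] == ch:
--             cnt += 1
--             i += dr
--             j += dc
--         return cnt
--
--     for dr, dc in dirs:
--         i, j = r, c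
--         while 0 <= i - dr < n and 0 <= j - dc < n and board[i - dr][j - dc] == ch:
--             i -= dr
--             j -= dc
--         total = count_line(i, j, dr, dc)
--         if total >= 5:
--             board[r][c] = original
--             return True
--
--     board[r][c] = original
--     return False
-- ===== SOURCE B (Python) =====
-- def _has_five_if_place(board, r: int, c: int, ch: str) -> bool:
--     n = len(board)
--     original = board[r][c]
--     board[r][c] = ch
--
--     def ok(i, j):
--         return 0 <= i < n and 0 <= j < n and j < len(board[i]) and board[i][j] == ch
--
--     found = any(
--         all(ok(r + (t + s) * dr, c + (t + s) * dc) for s in range(5))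
--         for dr, dc in ((0, 1), (1, 0), (1, 1), (1, -1))
--         for t in range(-4, 1)
--     )
--     board[r][c] = original
--     return found
-- ===== Notes on version B (the rewrite author's own statement) =====
-- stated objective: alternative
-- what changed: A walks back to the start of the run through (r,c) and then re-counts the run forward with two unbounded while-loops per direction; B has no run-scanning loops at all: per direction it checks the five fixed windows of 5 consecutive cells that contain the placed cell, succeeding iff some window is entirely ch, which bounds the work to at most 80 cell tests.
-- outside the precondition, e.g. on _has_five_if_place([['o', 'x', 'o'], ['o', 'o', 'o'], ['x', 'x']], 0, 0, 'x'): A returns False, B returns False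
import Mathlib
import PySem

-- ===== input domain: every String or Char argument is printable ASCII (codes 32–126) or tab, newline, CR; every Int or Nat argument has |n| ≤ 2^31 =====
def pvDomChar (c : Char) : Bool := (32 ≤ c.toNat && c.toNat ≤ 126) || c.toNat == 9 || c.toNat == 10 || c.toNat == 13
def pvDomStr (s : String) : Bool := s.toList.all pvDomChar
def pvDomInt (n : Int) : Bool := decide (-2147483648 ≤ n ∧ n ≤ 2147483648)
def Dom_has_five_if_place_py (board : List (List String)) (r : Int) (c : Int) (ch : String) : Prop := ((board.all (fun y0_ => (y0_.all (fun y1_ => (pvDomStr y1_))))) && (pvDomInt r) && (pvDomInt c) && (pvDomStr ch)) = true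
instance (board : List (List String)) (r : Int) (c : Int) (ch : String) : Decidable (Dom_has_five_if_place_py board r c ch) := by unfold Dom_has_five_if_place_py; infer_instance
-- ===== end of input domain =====

-- B replaces A's per-direction pair of unbounded while-loops (walk back to the run start,
-- then re-count the whole run forward) by a loop-free bounded check: some one of the five
-- 5-cell windows through the placed cell is entirely ch. Alternative decomposition, same
-- result. Both Pythons temporarily mutate board[r][c] and restore it before every return,
-- so the caller observes no net mutation; the equivalence is about the return value.

-- ===== PORT A =====
def pvCell (b : List (List String)) (i j : Int) : String :=
  (b.getD i.toNat []).getD j.toNat ""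

def pvGuard (b : List (List String)) (n : Int) (ch : String) (i j : Int) : Bool :=
  decide (0 ≤ i) && decide (i < n) && decide (0 ≤ j) && decide (j < n) && (pvCell b i j == ch)

-- board with board[r][c] = ch (Python's negative-index rule for the write; exact on indices
-- that Python accepts, which Pre_ guarantees)
def pvPlace (board : List (List String)) (r c : Int) (ch : String) : List (List String) :=
  let n : Int := board.length
  let ri : Int := if r < 0 then r + n else r
  let row := board.getD ri.toNat []
  let ci : Int := if c < 0 then c + (row.length : Int) else c
  board.set ri.toNat (row.set ci.toNat ch)

-- A's inner while: count cells == ch from (i,j) stepping (dr,dc) (fuel makes the loop total;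
-- n+1 steps always suffice, since each admitted direction strictly increases i or j)
def pvCountLine (b : List (List String)) (n : Int) (ch : String) (dr dc : Int) :
    Nat → Int → Int → Int
  | 0, _, _ => 0
  | f + 1, i, j =>
    if pvGuard b n ch i j then 1 + pvCountLine b n ch dr dc f (i + dr) (j + dc) else 0

-- A's walk-back while: move to the start of the run through (i,j)
def pvWalkBack (b : List (List String)) (n : Int) (ch : String) (dr dc : Int) :
    Nat → Int → Int → Int × Int
  | 0, i, j => (i, j)
  | f + 1, i, j =>
    if pvGuard b n ch (i - dr) (j - dc) then pvWalkBack b n ch dr dc f (i - dr) (j - dc)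
    else (i, j)

-- A's for-loop over the four directions with early return
def pvLoopA (b : List (List String)) (n : Int) (ch : String) (r c : Int) :
    List (Int × Int) → Bool
  | [] => false
  | (dr, dc) :: rest =>
    let p := pvWalkBack b n ch dr dc (n.toNat + 1) r c
    if pvCountLine b n ch dr dc (n.toNat + 1) p.1 p.2 ≥ 5 then true
    else pvLoopA b n ch r c rest

def has_five_if_place_py (board : List (List String)) (r : Int) (c : Int) (ch : String) : Bool :=
  let n : Int := board.length
  let b := pvPlace board r c ch
  pvLoopA b n ch r c [(0, 1), (1, 0), (1, 1), (1, -1)]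

-- ===== PORT B =====
-- B's ok(i,j): on the n×n board, inside row i, and equal to ch
def pvOkB (b : List (List String)) (n : Int) (ch : String) (i j : Int) : Bool :=
  decide (0 ≤ i) && decide (i < n) && decide (0 ≤ j) && decide (j < n) &&
    decide (j < ((b.getD i.toNat []).length : Int)) && (pvCell b i j == ch)

-- B's window test: all(ok(r+(t+s)*dr, c+(t+s)*dc) for s in range(5))
def pvWinB (b : List (List String)) (n : Int) (ch : String) (r c dr dc t : Int) : Bool :=
  (PySem.List.pyRange 0 5 1).all
    (fun s => pvOkB b n ch (r + (t + s) * dr) (c + (t + s) * dc))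

def has_five_if_place_py_alt (board : List (List String)) (r : Int) (c : Int) (ch : String) : Bool :=
  let n : Int := board.length
  let b := pvPlace board r c ch
  [((0 : Int), (1 : Int)), (1, 0), (1, 1), (1, -1)].any
    (fun d => (PySem.List.pyRange (-4) 1 1).any (fun t => pvWinB b n ch r c d.1 d.2 t))

-- ===== PRECONDITION & SPEC =====
-- Pre_ admits inputs where the write board[r][c] = ch succeeds (Python's negative-index rule)
-- and either (a) the placement is fully on the n×n board with every row at least n long, or
-- (b) the raw coordinates satisfy r < 0 or c ≤ -2, where neither program's scans touch any cell.
-- Excluded although A may still return there: ragged boards with short rows (A usually raises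
-- IndexError there), and the raw coordinates c = -1 (with 0 ≤ r) or c ≥ n inside a long row,
-- where A scans cells adjacent to the unwrapped out-of-board coordinate — an artefact of
-- Python's index wraparound that B does not reproduce.
def Pre_has_five_if_place_py (board : List (List String)) (r : Int) (c : Int) (ch : String) : Prop :=
  (0 ≤ (if r < 0 then r + (board.length : Int) else r) ∧
   (if r < 0 then r + (board.length : Int) else r) < (board.length : Int) ∧
   0 ≤ (if c < 0 then
          c + ((board.getD (if r < 0 then r + (board.length : Int) else r).toNat []).length : Int)
        else c) ∧
   (if c < 0 then
      c + ((board.getD (if r < 0 then r + (board.length : Int) else r).toNat []).length : Int)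
    else c)
     < ((board.getD (if r < 0 then r + (board.length : Int) else r).toNat []).length : Int)) ∧
  ((0 ≤ r ∧ r < board.length ∧ 0 ≤ c ∧ c < board.length ∧
      ∀ row ∈ board, board.length ≤ row.length) ∨ r < 0 ∨ c ≤ -2)

instance (board : List (List String)) (r : Int) (c : Int) (ch : String) :
    Decidable (Pre_has_five_if_place_py board r c ch) := by
  unfold Pre_has_five_if_place_py; infer_instance

def pvWitness_has_five_if_place_py : List (List String) × Int × Int × String :=
  ([["x", "."], [".", "o"]], 0, 1, "x")

def Spec_has_five_if_place_py (board : List (List String)) (r : Int) (c : Int) (ch : String) (out : Bool) : Prop := out = has_five_if_place_py_alt board r c ch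
instance (board : List (List String)) (r : Int) (c : Int) (ch : String) (out : Bool) : Decidable (Spec_has_five_if_place_py board r c ch out) := by unfold Spec_has_five_if_place_py; infer_instance

-- ===== CLAIM (what is proved, stated in full; the proofs are below) =====
def Claim_equal_has_five_if_place_py : Prop := ∀ (board : List (List String)) (r : Int) (c : Int) (ch : String), Dom_has_five_if_place_py board r c ch → Pre_has_five_if_place_py board r c ch → Spec_has_five_if_place_py board r c ch (has_five_if_place_py board r c ch)

-- ===== LEMMAS AND PROOFS =====
-- 1-D model of a scan along a fixed direction: Q k says "cell at offset k from the
-- placed stone is on the board and equal to ch".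
def aCntF (Q : Int → Bool) : Nat → Int → Int
  | 0, _ => 0
  | f + 1, k => if Q k then 1 + aCntF Q f (k + 1) else 0

def aCntB (Q : Int → Bool) : Nat → Int → Int
  | 0, _ => 0
  | f + 1, k => if Q k then 1 + aCntB Q f (k - 1) else 0

def aWalk (Q : Int → Bool) : Nat → Int → Int
  | 0, k => k
  | f + 1, k => if Q (k - 1) then aWalk Q f (k - 1) else k

theorem aWalk_eq (Q : Int → Bool) : ∀ (f : Nat) (k : Int), aWalk Q f k = k - aCntB Q f (k - 1) := by
  intro f
  induction f with
  | zero => intro k; simp [aWalk, aCntB]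
  | succ f ih =>
    intro k
    simp only [aWalk, aCntB]
    by_cases h : Q (k - 1) = true
    · simp [h, ih (k - 1)]; ring
    · simp [h]

theorem aCntB_nonneg (Q : Int → Bool) : ∀ (f : Nat) (k : Int), 0 ≤ aCntB Q f k := by
  intro f
  induction f with
  | zero => intro k; simp [aCntB]
  | succ f ih =>
    intro k; simp only [aCntB]
    by_cases h : Q k = true
    · simp [h]; have := ih (k - 1); omega
    · simp [h]

theorem aCntF_nonneg (Q : Int → Bool) : ∀ (f : Nat) (k : Int), 0 ≤ aCntF Q f k := by
  intro f
  induction f with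
  | zero => intro k; simp [aCntF]
  | succ f ih =>
    intro k; simp only [aCntF]
    by_cases h : Q k = true
    · simp [h]; have := ih (k + 1); omega
    · simp [h]

theorem aCntB_prefix (Q : Int → Bool) :
    ∀ (f : Nat) (k m : Int), 0 ≤ m → m < aCntB Q f k → Q (k - m) = true := by
  intro f
  induction f with
  | zero => intro k m _ h; simp [aCntB] at h; omega
  | succ f ih =>
    intro k m hm h
    simp only [aCntB] at h
    by_cases hq : Q k = true
    · simp [hq] at h
      rcases eq_or_lt_of_le hm with he | hlt
      · simpa [← he] using hq
      · have : k - m = (k - 1) - (m - 1) := by ring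
        rw [this]
        exact ih (k - 1) (m - 1) (by omega) (by omega)
    · simp [hq] at h; omega

theorem aCntF_prefix (Q : Int → Bool) :
    ∀ (f : Nat) (k m : Int), 0 ≤ m → m < aCntF Q f k → Q (k + m) = true := by
  intro f
  induction f with
  | zero => intro k m _ h; simp [aCntF] at h; omega
  | succ f ih =>
    intro k m hm h
    simp only [aCntF] at h
    by_cases hq : Q k = true
    · simp [hq] at h
      rcases eq_or_lt_of_le hm with he | hlt
      · simpa [← he] using hq
      · have : k + m = (k + 1) + (m - 1) := by ring
        rw [this]
        exact ih (k + 1) (m - 1) (by omega) (by omega)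
    · simp [hq] at h; omega

theorem aCntF_ge (Q : Int → Bool) :
    ∀ (b f : Nat) (k : Int), b ≤ f → (∀ m : Nat, m < b → Q (k + m) = true) →
      (b : Int) ≤ aCntF Q f k := by
  intro b
  induction b with
  | zero => intro f k _ _; exact_mod_cast aCntF_nonneg Q f k
  | succ b ih =>
    intro f k hbf hall
    match f, hbf with
    | f + 1, hbf =>
      have hq : Q k = true := by simpa using hall 0 (by omega)
      simp only [aCntF, hq, if_true]
      have := ih f (k + 1) (by omega) (fun m hm => by
        have := hall (m + 1) (by omega)
        push_cast at this ⊢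
        convert this using 2
        ring)
      push_cast
      omega

theorem aCntB_ge (Q : Int → Bool) :
    ∀ (b f : Nat) (k : Int), b ≤ f → (∀ m : Nat, m < b → Q (k - m) = true) →
      (b : Int) ≤ aCntB Q f k := by
  intro b
  induction b with
  | zero => intro f k _ _; exact_mod_cast aCntB_nonneg Q f k
  | succ b ih =>
    intro f k hbf hall
    match f, hbf with
    | f + 1, hbf =>
      have hq : Q k = true := by simpa using hall 0 (by omega)
      simp only [aCntB, hq, if_true]
      have := ih f (k - 1) (by omega) (fun m hm => by
        have := hall (m + 1) (by omega)
        push_cast at this ⊢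
        convert this using 2
        ring)
      push_cast
      omega

theorem aCntF_chunk (Q : Int → Bool) :
    ∀ (b f : Nat) (k : Int), b ≤ f → (∀ m : Nat, m < b → Q (k + m) = true) →
      aCntF Q f k = b + aCntF Q (f - b) (k + b) := by
  intro b
  induction b with
  | zero => intro f k _ _; simp
  | succ b ih =>
    intro f k hbf hall
    match f, hbf with
    | f + 1, hbf =>
      have hq : Q k = true := by simpa using hall 0 (by omega)
      simp only [aCntF, hq, if_true]
      have := ih f (k + 1) (by omega) (fun m hm => by
        have := hall (m + 1) (by omega)
        push_cast at this ⊢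
        convert this using 2
        ring)
      rw [this]
      have h1 : f - b = f + 1 - (b + 1) := by omega
      have h2 : k + 1 + (b : Int) = k + ((b : Nat) + 1 : Nat) := by push_cast; ring
      rw [h1] at this ⊢
      rw [← h2]
      push_cast
      ring

theorem aCntF_stable (Q : Int → Bool) :
    ∀ (t f f' : Nat) (k : Int), t < f → t < f' → Q (k + t) = false →
      aCntF Q f k = aCntF Q f' k := by
  intro t
  induction t with
  | zero =>
    intro f f' k hf hf' hq
    match f, f', hf, hf' with
    | f + 1, f' + 1, _, _ =>
      simp only [aCntF]
      simp at hq
      simp [hq]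
  | succ t ih =>
    intro f f' k hf hf' hq
    match f, f', hf, hf' with
    | f + 1, f' + 1, _, _ =>
      simp only [aCntF]
      by_cases h : Q k = true
      · simp [h]
        have := ih f f' (k + 1) (by omega) (by omega) (by
          convert hq using 2; push_cast; ring)
        rw [this]
      · simp [h]

theorem aCore (Q : Int → Bool) (n : Nat) (hQ0 : Q 0 = true)
    (hw : ∀ k k', Q k = true → Q k' = true → k' - k < (n : Int)) :
    aCntF Q (n + 1) (aWalk Q (n + 1) 0) = 1 + aCntF Q (n + 1) 1 + aCntB Q (n + 1) (-1) := by
  have hn : 0 < (n : Int) := by have := hw 0 0 hQ0 hQ0; omega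
  set Bk := aCntB Q (n + 1) (-1) with hBk
  have hBnn : 0 ≤ Bk := aCntB_nonneg Q _ _
  have hpre : ∀ m : Int, 0 ≤ m → m < Bk → Q (-1 - m) = true := fun m h1 h2 =>
    aCntB_prefix Q (n + 1) (-1) m h1 h2
  have hBlt : Bk < (n : Int) := by
    rcases eq_or_lt_of_le hBnn with he | hpos
    · omega
    · have hQB : Q (-Bk) = true := by
        have := hpre (Bk - 1) (by omega) (by omega)
        convert this using 2; ring
      have := hw (-Bk) 0 hQB hQ0
      omega
  have hwalk : aWalk Q (n + 1) 0 = -Bk := by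
    rw [aWalk_eq]; simp [hBk]
  rw [hwalk]
  -- the b := Bk + 1 consecutive true cells from -Bk through 0
  have hb : (Bk.toNat + 1 : Nat) ≤ n + 1 := by omega
  have hchunk := aCntF_chunk Q (Bk.toNat + 1) (n + 1) (-Bk) hb (fun m hm => by
    have hmB : (m : Int) ≤ Bk := by omega
    rcases eq_or_lt_of_le hmB with he | hlt
    · have : -Bk + (m : Int) = 0 := by omega
      rw [this]; exact hQ0
    · have := hpre (Bk - 1 - m) (by omega) (by omega)
      have he2 : -Bk + (m : Int) = -1 - (Bk - 1 - m) := by ring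
      rw [he2]; exact this)
  have hk : -Bk + ((Bk.toNat + 1 : Nat) : Int) = 1 := by push_cast; omega
  rw [hk] at hchunk
  rw [hchunk]
  -- stabilise the fuel of the forward count
  have hstab : aCntF Q (n + 1 - (Bk.toNat + 1)) 1 = aCntF Q (n + 1) 1 := by
    have hfalse : Q (1 + (n - 1 - Bk.toNat : Nat)) = false := by
      by_contra h
      have hq : Q (1 + ((n - 1 - Bk.toNat : Nat) : Int)) = true := by
        cases hx : Q (1 + ((n - 1 - Bk.toNat : Nat) : Int)) with
        | false => exact absurd hx h
        | true => rfl
      have he : 1 + ((n - 1 - Bk.toNat : Nat) : Int) = (n : Int) - Bk := by omega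
      rw [he] at hq
      rcases eq_or_lt_of_le hBnn with h0 | hpos
      · have := hw 0 ((n : Int) - Bk) hQ0 hq; omega
      · have hQB : Q (-Bk) = true := by
          have := hpre (Bk - 1) (by omega) (by omega)
          convert this using 2; ring
        have := hw (-Bk) ((n : Int) - Bk) hQB hq
        omega
    exact aCntF_stable Q (n - 1 - Bk.toNat) (n + 1 - (Bk.toNat + 1)) (n + 1) 1
      (by omega) (by omega) hfalse
  rw [hstab]
  push_cast
  omega

-- A's per-direction total ≥ 5 iff some 5-cell window through the centre is all true
theorem window_iff (Q : Int → Bool) (N : Nat) (hQ0 : Q 0 = true)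
    (hw : ∀ k k', Q k = true → Q k' = true → k' - k < (N : Int)) :
    (5 ≤ aCntF Q (N + 1) (aWalk Q (N + 1) 0)) ↔
      ∃ t : Int, -4 ≤ t ∧ t ≤ 0 ∧ ∀ s : Int, 0 ≤ s → s ≤ 4 → Q (t + s) = true := by
  rw [aCore Q N hQ0 hw]
  set F := aCntF Q (N + 1) 1 with hF
  set Bk := aCntB Q (N + 1) (-1) with hB
  have hF0 : 0 ≤ F := aCntF_nonneg Q _ _
  have hB0 : 0 ≤ Bk := aCntB_nonneg Q _ _
  have Qin : ∀ m : Int, -Bk ≤ m → m ≤ F → Q m = true := by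
    intro m h1 h2
    rcases lt_trichotomy m 0 with h | h | h
    · have := aCntB_prefix Q (N + 1) (-1) (-m - 1) (by omega) (by omega)
      have he : (-1 : Int) - (-m - 1) = m := by ring
      rwa [he] at this
    · rw [h]; exact hQ0
    · have := aCntF_prefix Q (N + 1) 1 (m - 1) (by omega) (by omega)
      have he : (1 : Int) + (m - 1) = m := by ring
      rwa [he] at this
  constructor
  · intro h5
    by_cases hb : 4 ≤ Bk
    · exact ⟨-4, by omega, by omega, fun s hs0 hs4 => Qin _ (by omega) (by omega)⟩
    · exact ⟨-Bk, by omega, by omega, fun s hs0 hs4 => Qin _ (by omega) (by omega)⟩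
  · rintro ⟨t, ht1, ht2, hwin⟩
    have hQt : Q t = true := by
      have := hwin 0 le_rfl (by omega)
      simpa using this
    have hQt4 : Q (t + 4) = true := hwin 4 (by omega) le_rfl
    have hN : 4 < (N : Int) := by have := hw t (t + 4) hQt hQt4; omega
    have hBk : -t ≤ Bk := by
      have := aCntB_ge Q (-t).toNat (N + 1) (-1) (by omega) (fun m hm => by
        have hm' : (m : Int) < -t := by omega
        have := hwin (-1 - m - t) (by omega) (by omega)
        have he : t + (-1 - (m : Int) - t) = -1 - m := by ring
        rwa [he] at this)
      omega
    have hFt : t + 4 ≤ F := by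
      have := aCntF_ge Q (t + 4).toNat (N + 1) 1 (by omega) (fun m hm => by
        have hm' : (m : Int) < t + 4 := by omega
        have := hwin (1 + m - t) (by omega) (by omega)
        have he : t + (1 + (m : Int) - t) = 1 + m := by ring
        rwa [he] at this)
      omega
    omega

-- bridges between the 2-D port of A and the 1-D model
theorem bridge_cntF (b : List (List String)) (n : Int) (ch : String) (dr dc r c : Int) :
    ∀ (f : Nat) (k : Int),
      pvCountLine b n ch dr dc f (r + k * dr) (c + k * dc)
        = aCntF (fun k => pvGuard b n ch (r + k * dr) (c + k * dc)) f k := by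
  intro f
  induction f with
  | zero => intro k; rfl
  | succ f ih =>
    intro k
    simp only [pvCountLine, aCntF]
    by_cases h : pvGuard b n ch (r + k * dr) (c + k * dc) = true
    · simp only [h, if_true]
      have h1 : r + k * dr + dr = r + (k + 1) * dr := by ring
      have h2 : c + k * dc + dc = c + (k + 1) * dc := by ring
      rw [h1, h2, ih (k + 1)]
    · simp [h]

theorem bridge_walk (b : List (List String)) (n : Int) (ch : String) (dr dc r c : Int) :
    ∀ (f : Nat) (k : Int),
      pvWalkBack b n ch dr dc f (r + k * dr) (c + k * dc)
        = (r + (aWalk (fun k => pvGuard b n ch (r + k * dr) (c + k * dc)) f k) * dr,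
           c + (aWalk (fun k => pvGuard b n ch (r + k * dr) (c + k * dc)) f k) * dc) := by
  intro f
  induction f with
  | zero => intro k; rfl
  | succ f ih =>
    intro k
    simp only [pvWalkBack, aWalk]
    have h1 : r + k * dr - dr = r + (k - 1) * dr := by ring
    have h2 : c + k * dc - dc = c + (k - 1) * dc := by ring
    by_cases h : pvGuard b n ch (r + (k - 1) * dr) (c + (k - 1) * dc) = true
    · rw [h1, h2]; simp only [h, if_true]; exact ih (k - 1)
    · rw [h1, h2]; simp [h]

theorem guard_bounds {b : List (List String)} {n : Int} {ch : String} {i j : Int}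
    (h : pvGuard b n ch i j = true) : 0 ≤ i ∧ i < n ∧ 0 ≤ j ∧ j < n := by
  simp only [pvGuard, Bool.and_eq_true, decide_eq_true_eq] at h
  exact ⟨h.1.1.1.1, h.1.1.1.2, h.1.1.2, h.1.2⟩

-- the placed cell reads back as ch
theorem place_cell (board : List (List String)) (r c : Int) (ch : String)
    (hr0 : 0 ≤ r) (hrn : r < (board.length : Int)) (hc0 : 0 ≤ c)
    (hcn : c < (board.length : Int))
    (hrow : ∀ row ∈ board, board.length ≤ row.length) :
    pvCell (pvPlace board r c ch) r c = ch := by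
  simp only [pvPlace, pvCell]
  have hrneg : ¬ r < 0 := by omega
  simp only [hrneg, if_false]
  have hrlt : r.toNat < board.length := by omega
  have hrowlen : (board.length : Int) ≤ ((board.getD r.toNat []).length : Int) := by
    have hmem : board.getD r.toNat [] ∈ board := by
      rw [List.getD_eq_getElem?_getD, List.getElem?_eq_getElem hrlt]
      simp
    exact_mod_cast hrow _ hmem
  have hcneg : ¬ c < 0 := by omega
  simp only [hcneg, if_false]
  have hclt : c.toNat < (board.getD r.toNat []).length := by omega
  have h1 : (board.set r.toNat ((board.getD r.toNat []).set c.toNat ch)).getD r.toNat []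
      = (board.getD r.toNat []).set c.toNat ch := by
    rw [List.getD_eq_getElem?_getD, List.getElem?_set_self hrlt]
    simp
  rw [h1]
  rw [List.getD_eq_getElem?_getD, List.getElem?_set_self hclt]
  simp

-- placement preserves the length of every row on a board whose rows all have length ≥ n
theorem place_rows (board : List (List String)) (r c : Int) (ch : String)
    (hr0 : 0 ≤ r) (hrn : r < (board.length : Int))
    (hrow : ∀ row ∈ board, board.length ≤ row.length) :
    ∀ i : Int, 0 ≤ i → i < (board.length : Int) →
      (board.length : Int) ≤ (((pvPlace board r c ch).getD i.toNat []).length : Int) := by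
  intro i h1 h2
  simp only [pvPlace]
  have hrneg : ¬ r < 0 := by omega
  simp only [hrneg, if_false]
  have hilt : i.toNat < board.length := by omega
  by_cases he : i.toNat = r.toNat
  · rw [he]
    have hrlt : r.toNat < board.length := by omega
    rw [List.getD_eq_getElem?_getD, List.getElem?_set_self hrlt]
    simp only [Option.getD_some, List.length_set]
    have hmem : board.getD r.toNat [] ∈ board := by
      rw [List.getD_eq_getElem?_getD, List.getElem?_eq_getElem hrlt]
      simp
    exact_mod_cast hrow _ hmem
  · rw [List.getD_eq_getElem?_getD, List.getElem?_set_ne (by omega)]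
    rw [List.getElem?_eq_getElem hilt]
    simp only [Option.getD_some]
    have hmem : board[i.toNat] ∈ board := List.getElem_mem hilt
    exact_mod_cast hrow _ hmem

-- on a board whose rows all have length ≥ n, B's ok equals A's guard
theorem okB_eq_guard (b : List (List String)) (n : Int) (ch : String)
    (hrows : ∀ i : Int, 0 ≤ i → i < n → n ≤ ((b.getD i.toNat []).length : Int)) :
    ∀ i j, pvOkB b n ch i j = pvGuard b n ch i j := by
  intro i j
  simp only [pvOkB, pvGuard]
  by_cases h1 : 0 ≤ i
  · by_cases h2 : i < n
    · by_cases h3 : 0 ≤ j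
      · by_cases h4 : j < n
        · have h5 : j < ((b.getD i.toNat []).length : Int) :=
            lt_of_lt_of_le h4 (hrows i h1 h2)
          simp only [List.getD_eq_getElem?_getD] at h5
          simp [h1, h2, h3, h4, h5]
        · simp [h4]
      · simp [h3]
    · simp [h2]
  · simp [h1]

-- one direction: A's walk-back-then-count total ≥ 5 iff one of B's five windows is all ch
theorem dir_iff (b : List (List String)) (N : Nat) (ch : String) (dr dc r c : Int)
    (hQ0 : pvGuard b (N : Int) ch r c = true)
    (hd : dr = 1 ∨ (dr = 0 ∧ dc = 1))
    (hok : ∀ i j, pvOkB b (N : Int) ch i j = pvGuard b (N : Int) ch i j) :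
    (pvCountLine b (N : Int) ch dr dc (((N : Int)).toNat + 1)
        (pvWalkBack b (N : Int) ch dr dc (((N : Int)).toNat + 1) r c).1
        (pvWalkBack b (N : Int) ch dr dc (((N : Int)).toNat + 1) r c).2 ≥ 5)
      ↔ ((PySem.List.pyRange (-4) 1 1).any
            (fun t => pvWinB b (N : Int) ch r c dr dc t) = true) := by
  have hfuel : ((N : Int)).toNat = N := by simp
  rw [hfuel]
  have hQ0' : (fun k => pvGuard b (N : Int) ch (r + k * dr) (c + k * dc)) 0 = true := by
    simpa using hQ0
  have hw : ∀ k k', (fun k => pvGuard b (N : Int) ch (r + k * dr) (c + k * dc)) k = true →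
      (fun k => pvGuard b (N : Int) ch (r + k * dr) (c + k * dc)) k' = true →
      k' - k < (N : Int) := by
    intro k k' hk hk'
    have b1 := guard_bounds hk
    have b2 := guard_bounds hk'
    rcases hd with h1 | ⟨h0, h1⟩
    · rw [h1] at b1 b2; simp at b1 b2; omega
    · rw [h0, h1] at b1 b2; simp at b1 b2; omega
  have hr0 : r = r + 0 * dr := by ring
  have hc0 : c = c + 0 * dc := by ring
  have hwalk := bridge_walk b (N : Int) ch dr dc r c (N + 1) 0
  rw [← hr0, ← hc0] at hwalk
  rw [hwalk]
  rw [bridge_cntF b (N : Int) ch dr dc r c (N + 1)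
      (aWalk (fun k => pvGuard b (N : Int) ch (r + k * dr) (c + k * dc)) (N + 1) 0)]
  rw [ge_iff_le, window_iff _ N hQ0' hw]
  have hr5 : PySem.List.pyRange (-4) 1 1 = [-4, -3, -2, -1, 0] := by decide
  have hr05 : PySem.List.pyRange 0 5 1 = [0, 1, 2, 3, 4] := by decide
  rw [hr5]
  rw [List.any_eq_true]
  constructor
  · rintro ⟨t, ht1, ht2, hwin⟩
    refine ⟨t, by simp only [List.mem_cons, List.not_mem_nil, or_false]; omega, ?_⟩
    simp only [pvWinB, hr05, List.all_eq_true]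
    intro s hs
    rw [hok]
    have hb : 0 ≤ s ∧ s ≤ 4 := by
      simp only [List.mem_cons, List.not_mem_nil, or_false] at hs; omega
    exact hwin s hb.1 hb.2
  · rintro ⟨t, htmem, hall⟩
    have htb : -4 ≤ t ∧ t ≤ 0 := by
      simp only [List.mem_cons, List.not_mem_nil, or_false] at htmem; omega
    refine ⟨t, htb.1, htb.2, ?_⟩
    intro s hs0 hs4
    simp only [pvWinB, hr05, List.all_eq_true] at hall
    have := hall s (by simp only [List.mem_cons, List.not_mem_nil, or_false]; omega)
    rw [hok] at this
    exact this

theorem pvGuard_false_off (b : List (List String)) (n : Int) (ch : String) (i j : Int)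
    (h : i < 0 ∨ j < 0) : pvGuard b n ch i j = false := by
  simp only [pvGuard]
  rcases h with h | h
  · have : decide (0 ≤ i) = false := by simp; omega
    simp [this]
  · have : decide (0 ≤ j) = false := by simp; omega
    simp [this]

theorem pvOkB_false_off (b : List (List String)) (n : Int) (ch : String) (i j : Int)
    (h : i < 0 ∨ j < 0) : pvOkB b n ch i j = false := by
  simp only [pvOkB]
  rcases h with h | h
  · have : decide (0 ≤ i) = false := by simp; omega
    simp [this]
  · have : decide (0 ≤ j) = false := by simp; omega
    simp [this]

-- every one of B's windows contains the placed cell; if it fails the ok-test the window fails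
theorem winB_false_center (b : List (List String)) (n : Int) (ch : String)
    (r c dr dc t : Int) (ht1 : -4 ≤ t) (ht2 : t ≤ 0)
    (h : pvOkB b n ch r c = false) : pvWinB b n ch r c dr dc t = false := by
  have hr05 : PySem.List.pyRange 0 5 1 = [0, 1, 2, 3, 4] := by decide
  simp only [pvWinB, hr05]
  rw [List.all_eq_false]
  refine ⟨-t, by simp only [List.mem_cons, List.not_mem_nil, or_false]; omega, ?_⟩
  have h1 : r + (t + -t) * dr = r := by ring
  have h2 : c + (t + -t) * dc = c := by ring
  simp only [h1, h2, h]
  simp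

-- when r < 0 or c ≤ -2, every while-guard of A and every window of B fails at once:
-- neither program reads any cell and both return False
theorem noscan (board : List (List String)) (r c : Int) (ch : String)
    (h : r < 0 ∨ c ≤ -2) :
    has_five_if_place_py board r c ch = false ∧
      has_five_if_place_py_alt board r c ch = false := by
  have h1 : pvGuard (pvPlace board r c ch) (board.length : Int) ch r (c - 1) = false :=
    pvGuard_false_off _ _ _ _ _ (by omega)
  have h2 : pvGuard (pvPlace board r c ch) (board.length : Int) ch (r - 1) c = false :=
    pvGuard_false_off _ _ _ _ _ (by omega)
  have h3 : pvGuard (pvPlace board r c ch) (board.length : Int) ch (r - 1) (c - 1) = false :=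
    pvGuard_false_off _ _ _ _ _ (by omega)
  have h4 : pvGuard (pvPlace board r c ch) (board.length : Int) ch (r - 1) (c + 1) = false :=
    pvGuard_false_off _ _ _ _ _ (by omega)
  have h5 : pvGuard (pvPlace board r c ch) (board.length : Int) ch r c = false :=
    pvGuard_false_off _ _ _ _ _ (by omega)
  have h6 : pvOkB (pvPlace board r c ch) (board.length : Int) ch r c = false :=
    pvOkB_false_off _ _ _ _ _ (by omega)
  constructor
  · simp only [has_five_if_place_py, pvLoopA, pvWalkBack, pvCountLine]
    simp [h1, h2, h3, h4, h5]
  · simp only [has_five_if_place_py_alt]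
    rw [List.any_eq_false]
    intro d hd
    rw [Bool.not_eq_true, List.any_eq_false]
    intro t ht
    have htb : -4 ≤ t ∧ t ≤ 0 := by
      have hr5 : PySem.List.pyRange (-4) 1 1 = [-4, -3, -2, -1, 0] := by decide
      rw [hr5] at ht
      simp only [List.mem_cons, List.not_mem_nil, or_false] at ht; omega
    simp only [winB_false_center _ _ _ _ _ _ _ _ htb.1 htb.2 h6]
    simp

-- Bool glue: an if-condition equivalent to a Bool turns the early-return chain into ||
theorem if_or (P : Prop) [Decidable P] (w rest : Bool) (h : P ↔ w = true) :
    (if P then true else rest) = (w || rest) := by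
  by_cases hp : P
  · simp [hp, h.mp hp]
  · have hw : w = false := by
      cases hx : w with
      | false => rfl
      | true => exact absurd (h.mpr hx) hp
    simp [hp, hw]

theorem main_eq (board : List (List String)) (r c : Int) (ch : String)
    (hpre : Pre_has_five_if_place_py board r c ch) :
    has_five_if_place_py board r c ch = has_five_if_place_py_alt board r c ch := by
  by_cases hns : r < 0 ∨ c ≤ -2
  · obtain ⟨hA, hB⟩ := noscan board r c ch hns
    rw [hA, hB]
  have hin : 0 ≤ r ∧ r < (board.length : Int) ∧ 0 ≤ c ∧ c < (board.length : Int) ∧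
      ∀ row ∈ board, board.length ≤ row.length := by
    rcases hpre.2 with h | h | h
    · exact_mod_cast h
    · exact absurd (Or.inl h) hns
    · exact absurd (Or.inr h) hns
  obtain ⟨hr0, hrn, hc0, hcn, hrow⟩ := hin
  have hQ0 : pvGuard (pvPlace board r c ch) ((board.length : Nat) : Int) ch r c = true := by
    simp only [pvGuard, place_cell board r c ch hr0 hrn hc0 hcn hrow,
      beq_self_eq_true, Bool.and_true, Bool.and_eq_true, decide_eq_true_eq]
    exact ⟨⟨⟨hr0, hrn⟩, hc0⟩, hcn⟩
  have hok : ∀ i j, pvOkB (pvPlace board r c ch) ((board.length : Nat) : Int) ch i j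
      = pvGuard (pvPlace board r c ch) ((board.length : Nat) : Int) ch i j :=
    okB_eq_guard _ _ _ (fun i h1 h2 => place_rows board r c ch hr0 hrn hrow i h1 h2)
  have e1 := dir_iff (pvPlace board r c ch) board.length ch 0 1 r c hQ0 (Or.inr ⟨rfl, rfl⟩) hok
  have e2 := dir_iff (pvPlace board r c ch) board.length ch 1 0 r c hQ0 (Or.inl rfl) hok
  have e3 := dir_iff (pvPlace board r c ch) board.length ch 1 1 r c hQ0 (Or.inl rfl) hok
  have e4 := dir_iff (pvPlace board r c ch) board.length ch 1 (-1) r c hQ0 (Or.inl rfl) hok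
  simp only [has_five_if_place_py, has_five_if_place_py_alt, pvLoopA,
    List.any_cons, List.any_nil]
  rw [if_or _ _ _ e1, if_or _ _ _ e2, if_or _ _ _ e3, if_or _ _ _ e4]

-- ===== VERDICT (by name: the statement is the Claim_ definition above) =====
theorem has_five_if_place_py_spec : Claim_equal_has_five_if_place_py := by
  intro board r c ch _ hpre
  unfold Spec_has_five_if_place_py
  exact main_eq board r c ch hpre
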